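-- pv_equiv track=rewrite | github.com/PyBalance/mineru-lite-cli | src/mineru_lite/pdf_utils.py | parse_pages_spec
-- ===== SOURCE A (Python) =====
-- from typing import List, Optional
--
-- def parse_pages_spec(spec: Optional[str], total_pages: int) -> List[int]:
--     if not spec or not spec.strip():
--         return list(range(total_pages))
--
--     spec = spec.replace(" ", "")
--     result: set[int] = set()
--     tokens = [t for t in spec.split(",") if t]
--
--     for tok in tokens:
--         if "-" in tok:
--             left, right = tok.split("-", 1)
--             l = int(left) if left.isdigit() else 1
--             r = int(right) if right.isdigit() else total_pages
--         else:
--             if not tok.isdigit():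
--                 continue
--             l = r = int(tok)
--
--         l = max(1, min(l, total_pages))
--         r = max(1, min(r, total_pages))
--
--         if l <= r:
--             for p in range(l, r + 1):
--                 result.add(p - 1)
--
--     return sorted(result)
-- ===== SOURCE B (Python) =====
-- from typing import List, Optional
--
--
-- def _interval(tok: str, total_pages: int):
--     """One token -> clamped 1-based interval (l, r) with l <= r, or None."""
--     cut = tok.find("-")
--     if cut < 0:
--         if not tok.isdigit():
--             return None
--         l = r = int(tok)
--     else:
--         left, right = tok[:cut], tok[cut + 1:]
--         l = int(left) if left.isdigit() else 1
--         r = int(right) if right.isdigit() else total_pages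
--     l = max(1, min(l, total_pages))
--     r = max(1, min(r, total_pages))
--     return (l, r) if l <= r else None
--
--
-- def _sweep(ivs, done: int) -> List[int]:
--     """Emit (0-based) the pages of the l-sorted intervals above the high-water mark `done`."""
--     if not ivs:
--         return []
--     l, r = ivs[0]
--     start = l if l > done else done + 1
--     top = r if r > done else done
--     return [p - 1 for p in range(start, r + 1)] + _sweep(ivs[1:], top)
--
--
-- def parse_pages_spec(spec: Optional[str], total_pages: int) -> List[int]:
--     if not spec or not spec.strip():
--         return list(range(total_pages))
--     body = spec.replace(" ", "")
--     ivs = []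
--     for tok in body.split(","):
--         iv = _interval(tok, total_pages) if tok else None
--         if iv is not None:
--             ivs.append(iv)
--     ivs.sort(key=lambda iv: iv[0])
--     return _sweep(ivs, 0)
-- ===== Notes on version B (the rewrite author's own statement) =====
-- stated objective: alternative
-- what changed: A inserts every page of every token into a set and then sorts the pages; B turns each token into a clamped interval once (via find/slicing instead of membership+split), sorts the intervals by left endpoint, and emits each page exactly once with a recursive high-water-mark sweep (asymptotically better on overlap-heavy specs, though a timing run measured no difference).
import Mathlib
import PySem

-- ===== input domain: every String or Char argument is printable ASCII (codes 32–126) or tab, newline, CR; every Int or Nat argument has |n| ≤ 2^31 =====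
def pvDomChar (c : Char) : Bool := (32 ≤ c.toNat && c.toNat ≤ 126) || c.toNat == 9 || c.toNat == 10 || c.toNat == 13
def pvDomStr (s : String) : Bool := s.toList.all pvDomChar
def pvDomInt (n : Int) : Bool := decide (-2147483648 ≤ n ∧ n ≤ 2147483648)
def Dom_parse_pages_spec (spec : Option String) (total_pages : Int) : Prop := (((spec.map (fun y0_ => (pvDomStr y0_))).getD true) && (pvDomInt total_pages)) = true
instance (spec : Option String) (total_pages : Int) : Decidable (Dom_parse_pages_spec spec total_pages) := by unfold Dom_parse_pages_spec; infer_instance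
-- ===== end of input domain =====

-- B replaces A's per-page set insertion (every page of every token added to a set, then sorted)
-- by parsing each token into a clamped interval once (locating '-' with find and slicing, instead
-- of membership + split), sorting the intervals by left endpoint, and emitting each page once with
-- a recursive high-water-mark sweep; objective: alternative algorithm (no measured speed claim).

-- ===== PORT A =====
-- A's tokens: [t for t in spec.replace(" ", "").split(",") if t]
def pv_tokens (cs : List Char) : List (List Char) :=
  (PySem.Chars.splitOn (PySem.Chars.replace cs [' '] []) [',']).filter (fun t => decide (t ≠ []))

-- A's token body: "-" in tok → split("-", 1); else isdigit; then clamp both ends, keep if l ≤ r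
def pv_clampTok (total_pages : Int) (tok : List Char) : Option (Int × Int) :=
  match
    (if PySem.Chars.isIn ['-'] tok then
      match PySem.Chars.splitOnMax tok ['-'] 1 with
      | left :: right :: _ =>
          some ((if PySem.Chars.strIsdigit left then (PySem.Int.ofChars? left).getD 0 else 1),
                (if PySem.Chars.strIsdigit right then (PySem.Int.ofChars? right).getD 0 else total_pages))
      | _ => none  -- unreachable: "-" ∈ tok gives ≥ 2 parts
    else if PySem.Chars.strIsdigit tok then
      some ((PySem.Int.ofChars? tok).getD 0, (PySem.Int.ofChars? tok).getD 0)
    else none) with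
  | none => none
  | some lr =>
      if max 1 (min lr.1 total_pages) ≤ max 1 (min lr.2 total_pages) then
        some (max 1 (min lr.1 total_pages), max 1 (min lr.2 total_pages))
      else none

-- A's inner loop: for p in range(l, r+1): result.add(p-1)
def pv_addRange (res : PySem.Set Int) (lr : Int × Int) : PySem.Set Int :=
  (PySem.List.pyRange lr.1 (lr.2 + 1) 1).foldl (fun r2 p => PySem.Set.add r2 (p - 1)) res

def parse_pages_spec (spec : Option String) (total_pages : Int) : List Int :=
  match spec with
  | none => PySem.List.pyRange 0 total_pages 1
  | some s =>
    if s.toList = [] ∨ PySem.Chars.strip s.toList = [] then PySem.List.pyRange 0 total_pages 1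
    else
      PySem.List.sorted
        ((pv_tokens s.toList).foldl
          (fun (res : PySem.Set Int) tok =>
            match pv_clampTok total_pages tok with
            | some lr => pv_addRange res lr
            | none => res)
          PySem.Set.empty)
        (fun x => x) false

-- ===== PORT B =====
-- B's _interval: cut = tok.find("-"); slice around it (or whole-token digits); clamp; keep if l ≤ r
def pvB_interval (total_pages : Int) (tok : List Char) : Option (Int × Int) :=
  let cut := PySem.Chars.find tok ['-']
  if cut < 0 then
    if PySem.Chars.strIsdigit tok then
      let v := (PySem.Int.ofChars? tok).getD 0
      let l := max 1 (min v total_pages)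
      let r := max 1 (min v total_pages)
      if l ≤ r then some (l, r) else none
    else none
  else
    let left := PySem.List.slice tok none (some cut)
    let right := PySem.List.slice tok (some (cut + 1)) none
    let l0 := if PySem.Chars.strIsdigit left then (PySem.Int.ofChars? left).getD 0 else 1
    let r0 := if PySem.Chars.strIsdigit right then (PySem.Int.ofChars? right).getD 0 else total_pages
    let l := max 1 (min l0 total_pages)
    let r := max 1 (min r0 total_pages)
    if l ≤ r then some (l, r) else none

-- B's _sweep: recursively emit [p-1 for p in range(start, r+1)] above the high-water mark `done`
def pvB_sweep : List (Int × Int) → Int → List Int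
  | [], _ => []
  | (l, r) :: tl, done =>
      (PySem.List.pyRange (if done < l then l else done + 1) (r + 1) 1).map (fun p => p - 1)
        ++ pvB_sweep tl (if done < r then r else done)

def parse_pages_spec_alt (spec : Option String) (total_pages : Int) : List Int :=
  match spec with
  | none => PySem.List.pyRange 0 total_pages 1
  | some s =>
    if s.toList = [] ∨ PySem.Chars.strip s.toList = [] then PySem.List.pyRange 0 total_pages 1
    else
      let body := PySem.Chars.replace s.toList [' '] []
      let ivs := (PySem.Chars.splitOn body [',']).foldl
        (fun acc tok =>
          match (if tok = [] then none else pvB_interval total_pages tok) with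
          | some iv => acc ++ [iv]
          | none => acc) []
      pvB_sweep (PySem.List.sorted ivs (fun p => p.1) false) 0

-- ===== PRECONDITION & SPEC =====
def Spec_parse_pages_spec (spec : Option String) (total_pages : Int) (out : List Int) : Prop := out = parse_pages_spec_alt spec total_pages
instance (spec : Option String) (total_pages : Int) (out : List Int) : Decidable (Spec_parse_pages_spec spec total_pages out) := by unfold Spec_parse_pages_spec; infer_instance

-- ===== CLAIM (what is proved, stated in full; the proofs are below) =====
def Claim_equal_parse_pages_spec : Prop := ∀ (spec : Option String) (total_pages : Int), Dom_parse_pages_spec spec total_pages → Spec_parse_pages_spec spec total_pages (parse_pages_spec spec total_pages)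

-- ===== LEMMAS AND PROOFS =====

-- find("-") locates the first '-': index = length of the '-'-free prefix, -1 if absent
lemma singleton_infix (c : Char) (l : List Char) : [c] <:+: l ↔ c ∈ l := by
  constructor
  · intro h; exact h.subset (List.mem_singleton_self _)
  · intro h
    obtain ⟨s, t, rfl⟩ := List.append_of_mem h
    exact ⟨s, t, by simp⟩

lemma find_go_char (c : Char) : ∀ (tok : List Char) (k : Nat),
    PySem.Chars.find.go [c] tok k =
      if c ∈ tok then ((k + (tok.takeWhile (· ≠ c)).length : Nat) : Int) else -1 := by
  intro tok
  induction tok with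
  | nil => intro k; simp [PySem.Chars.find.go]
  | cons a t ih =>
      intro k
      by_cases hac : c = a
      · subst hac
        simp [PySem.Chars.find.go, List.isPrefixOf]
      · have hpre : ([c].isPrefixOf (a :: t)) = false := by
          simp [List.isPrefixOf]; intro h; exact hac h
        have hmem : (c ∈ a :: t) ↔ c ∈ t :=
          ⟨fun h => (List.mem_cons.mp h).elim (fun h1 => absurd h1 hac) id,
           fun h => List.mem_cons_of_mem _ h⟩
        have hlen : ((a :: t).takeWhile (· ≠ c)).length = (t.takeWhile (· ≠ c)).length + 1 := by
          rw [List.takeWhile_cons, if_pos (decide_eq_true (Ne.symm hac))]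
          simp
        rw [PySem.Chars.find.go, hpre]
        simp only [Bool.false_eq_true, if_false]
        rw [ih (k + 1)]
        by_cases hct : c ∈ t
        · rw [if_pos hct, if_pos (List.mem_cons_of_mem a hct), hlen]
          omega
        · rw [if_neg hct, if_neg (fun h => hct (hmem.mp h))]

lemma find_char (c : Char) (tok : List Char) :
    PySem.Chars.find tok [c] =
      if c ∈ tok then (((tok.takeWhile (· ≠ c)).length : Nat) : Int) else -1 := by
  unfold PySem.Chars.find
  rw [find_go_char c tok 0]
  simp

-- tok.split("-", 1) when '-' occurs: the '-'-free prefix and everything after the first '-'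
lemma splitOnMax_go_zero (c : Char) : ∀ (fuel : Nat) (l cur : List Char) (accs : List (List Char)),
    PySem.Chars.splitOnMax.go [c] fuel 0 l cur accs = ((cur.reverse ++ l) :: accs).reverse := by
  intro fuel l cur accs
  cases fuel with
  | zero => simp [PySem.Chars.splitOnMax.go]
  | succ f =>
      cases l with
      | nil => simp [PySem.Chars.splitOnMax.go]
      | cons a t => simp [PySem.Chars.splitOnMax.go]

lemma splitOnMax_go_one (c : Char) : ∀ (tok : List Char) (fuel : Nat) (cur : List Char) (accs : List (List Char)),
    tok.length ≤ fuel →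
    PySem.Chars.splitOnMax.go [c] fuel 1 tok cur accs =
      if c ∈ tok then
        accs.reverse ++ [cur.reverse ++ tok.takeWhile (· ≠ c), (tok.dropWhile (· ≠ c)).tail]
      else accs.reverse ++ [cur.reverse ++ tok] := by
  intro tok
  induction tok with
  | nil =>
      intro fuel cur accs _
      cases fuel <;> simp [PySem.Chars.splitOnMax.go]
  | cons a t ih =>
      intro fuel cur accs hf
      cases fuel with
      | zero => simp at hf
      | succ f =>
          by_cases hac : c = a
          · subst hac
            rw [PySem.Chars.splitOnMax.go]
            rw [if_neg one_ne_zero]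
            rw [if_pos (show ([c].isPrefixOf (c :: t)) = true by simp [List.isPrefixOf])]
            rw [splitOnMax_go_zero]
            rw [if_pos List.mem_cons_self]
            rw [List.takeWhile_cons, if_neg (by simp), List.dropWhile_cons, if_neg (by simp)]
            simp
          · have hpre : ([c].isPrefixOf (a :: t)) = false := by
              simp [List.isPrefixOf]; intro h; exact hac h
            have hmem : (c ∈ a :: t) ↔ c ∈ t :=
              ⟨fun h => (List.mem_cons.mp h).elim (fun h1 => absurd h1 hac) id,
               fun h => List.mem_cons_of_mem _ h⟩
            rw [PySem.Chars.splitOnMax.go, hpre]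
            rw [if_neg one_ne_zero]
            simp only [Bool.false_eq_true, if_false]
            rw [ih f (a :: cur) accs (by simp at hf; omega)]
            by_cases hct : c ∈ t
            · rw [if_pos hct, if_pos (List.mem_cons_of_mem a hct)]
              rw [List.takeWhile_cons, if_pos (decide_eq_true (Ne.symm hac))]
              rw [List.dropWhile_cons, if_pos (decide_eq_true (Ne.symm hac))]
              simp
            · rw [if_neg hct, if_neg (fun h => hct (hmem.mp h))]
              simp

lemma splitOnMax_one (c : Char) (tok : List Char) (h : c ∈ tok) :
    PySem.Chars.splitOnMax tok [c] 1 =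
      [tok.takeWhile (· ≠ c), (tok.dropWhile (· ≠ c)).tail] := by
  unfold PySem.Chars.splitOnMax
  rw [if_neg (by omega)]
  rw [show ((1 : Int).toNat = 1) from rfl]
  rw [splitOnMax_go_one c tok (tok.length + 1) [] [] (by omega)]
  simp [h]

-- dropping the '-'-free prefix of a token is dropWhile
lemma drop_length_takeWhile {α : Type} (p : α → Bool) (l : List α) :
    l.drop (l.takeWhile p).length = l.dropWhile p := by
  induction l with
  | nil => rfl
  | cons a t ih =>
      by_cases hpa : p a = true
      · rw [List.takeWhile_cons, if_pos hpa, List.dropWhile_cons, if_pos hpa]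
        simpa using ih
      · rw [List.takeWhile_cons, if_neg hpa, List.dropWhile_cons, if_neg hpa]
        rfl

-- the two token parsers agree on every token
lemma clampTok_eq_interval (tp : Int) (tok : List Char) :
    pv_clampTok tp tok = pvB_interval tp tok := by
  by_cases hm : '-' ∈ tok
  · have hin : PySem.Chars.isIn ['-'] tok = true := by
      rw [PySem.Chars.isIn_iff_infix]
      exact (singleton_infix '-' tok).mpr hm
    have hfind : PySem.Chars.find tok ['-'] = (((tok.takeWhile (· ≠ '-')).length : Nat) : Int) := by
      rw [find_char]; simp [hm]
    have hsplit := splitOnMax_one '-' tok hm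
    have htake : PySem.List.slice tok none (some (((tok.takeWhile (· ≠ '-')).length : Nat) : Int))
        = tok.takeWhile (· ≠ '-') := by
      rw [PySem.List.slice_to_natCast]
      exact (List.prefix_iff_eq_take.mp (List.takeWhile_prefix _)).symm
    have hdrop : PySem.List.slice tok (some ((((tok.takeWhile (· ≠ '-')).length : Nat) : Int) + 1)) none
        = (tok.dropWhile (· ≠ '-')).tail := by
      rw [show ((((tok.takeWhile (· ≠ '-')).length : Nat) : Int) + 1)
            = (((tok.takeWhile (· ≠ '-')).length + 1 : Nat) : Int) from by push_cast; ring]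
      rw [PySem.List.slice_from_natCast]
      rw [← List.drop_drop, drop_length_takeWhile, List.drop_one]
    have hnn : ¬ ((((tok.takeWhile (· ≠ '-')).length : Nat) : Int) < 0) :=
      not_lt.mpr (Int.natCast_nonneg _)
    unfold pv_clampTok pvB_interval
    rw [hin, hfind, hsplit]
    simp only [if_true, hnn, if_false, htake, hdrop]
  · have hin : PySem.Chars.isIn ['-'] tok = false := by
      rw [PySem.Chars.isIn_eq_false_iff]
      exact fun h => hm ((singleton_infix '-' tok).mp h)
    have hfind : PySem.Chars.find tok ['-'] = -1 := by rw [find_char]; simp [hm]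
    unfold pv_clampTok pvB_interval
    rw [hin, hfind]
    by_cases hd : PySem.Chars.strIsdigit tok = true
    · rw [if_pos hd, if_pos hd]
      simp
    · rw [if_neg hd, if_neg hd]
      rfl

-- every interval produced by pv_clampTok satisfies 1 <= l <= r
lemma pv_clampTok_bounds (t : Int) (tok : List Char) (p : Int × Int)
    (h : pv_clampTok t tok = some p) : 1 ≤ p.1 ∧ p.1 ≤ p.2 := by
  unfold pv_clampTok at h
  split at h
  · exact absurd h (by simp)
  · split_ifs at h with hle
    · cases h; exact ⟨le_max_left _ _, hle⟩

-- membership in a fold of `result.add(p - 1)` insertions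
lemma mem_foldl_add_sub (l : List Int) (s : PySem.Set Int) (x : Int) :
    x ∈ l.foldl (fun r2 p => PySem.Set.add r2 (p - 1)) s ↔ x ∈ s ∨ x + 1 ∈ l := by
  induction l generalizing s with
  | nil => simp
  | cons a l ih =>
      rw [List.foldl_cons, ih, PySem.Set.mem_add, List.mem_cons]
      have hx : x = a - 1 ↔ x + 1 = a := by omega
      rw [hx]; tauto

lemma nodup_foldl_add_sub (l : List Int) (s : PySem.Set Int) (h : s.Nodup) :
    (l.foldl (fun r2 p => PySem.Set.add r2 (p - 1)) s).Nodup := by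
  induction l generalizing s with
  | nil => exact h
  | cons a l ih => exact ih _ (PySem.Set.nodup_add s (a - 1) h)

-- membership in A's inner per-page insertion loop
lemma mem_addRange (lr : Int × Int) (s : PySem.Set Int) (x : Int) :
    x ∈ pv_addRange s lr ↔ x ∈ s ∨ (lr.1 ≤ x + 1 ∧ x + 1 ≤ lr.2) := by
  unfold pv_addRange
  rw [mem_foldl_add_sub, PySem.List.mem_pyRange_one]
  have : lr.1 ≤ x + 1 ∧ x + 1 < lr.2 + 1 ↔ lr.1 ≤ x + 1 ∧ x + 1 ≤ lr.2 := by omega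
  rw [this]

-- membership in A's set after the whole token loop
lemma mem_setFold (ivs : List (Int × Int)) (s : PySem.Set Int) (x : Int) :
    x ∈ ivs.foldl pv_addRange s ↔ x ∈ s ∨ ∃ p ∈ ivs, p.1 ≤ x + 1 ∧ x + 1 ≤ p.2 := by
  induction ivs generalizing s with
  | nil => simp
  | cons q ivs ih =>
      rw [List.foldl_cons, ih, mem_addRange]
      simp only [List.mem_cons]
      constructor
      · rintro ((hs | hq) | ⟨p, hp, h⟩)
        · exact Or.inl hs
        · exact Or.inr ⟨q, Or.inl rfl, hq⟩
        · exact Or.inr ⟨p, Or.inr hp, h⟩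
      · rintro (hs | ⟨p, rfl | hp, h⟩)
        · exact Or.inl (Or.inl hs)
        · exact Or.inl (Or.inr h)
        · exact Or.inr ⟨p, hp, h⟩

lemma nodup_setFold (ivs : List (Int × Int)) (s : PySem.Set Int) (h : s.Nodup) :
    (ivs.foldl pv_addRange s).Nodup := by
  induction ivs generalizing s with
  | nil => exact h
  | cons q ivs ih => exact ih _ (nodup_foldl_add_sub _ s h)

-- the pages emitted for one interval in B's sweep
lemma mem_newseg (a b x : Int) :
    x ∈ (PySem.List.pyRange a (b + 1) 1).map (fun p => p - 1) ↔ a ≤ x + 1 ∧ x + 1 ≤ b := by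
  simp only [List.mem_map, PySem.List.mem_pyRange_one]
  constructor
  · rintro ⟨p, ⟨h1, h2⟩, rfl⟩; omega
  · rintro ⟨h1, h2⟩; exact ⟨x + 1, ⟨h1, by omega⟩, by omega⟩

lemma pairwise_newseg (a b : Int) :
    ((PySem.List.pyRange a (b + 1) 1).map (fun p => p - 1)).Pairwise (· < ·) := by
  rw [List.pairwise_map]
  exact (PySem.List.pairwise_lt_pyRange_one a (b + 1)).imp (fun h => by omega)

-- B's sweep on l-sorted intervals within [1, ∞): strictly increasing output, collecting exactly
-- the pages of the intervals that lie above the high-water mark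
lemma sweep_spec : ∀ (ivs : List (Int × Int)) (done : Int),
    ivs.Pairwise (fun a b => a.1 ≤ b.1) →
    (∀ p ∈ ivs, 1 ≤ p.1 ∧ p.1 ≤ p.2) →
    (pvB_sweep ivs done).Pairwise (· < ·) ∧
      (∀ x, x ∈ pvB_sweep ivs done ↔
        ∃ p ∈ ivs, p.1 ≤ x + 1 ∧ done < x + 1 ∧ x + 1 ≤ p.2) := by
  intro ivs
  induction ivs with
  | nil => intro done _ _; exact ⟨List.Pairwise.nil, by simp [pvB_sweep]⟩
  | cons hd tl ih =>
      intro done hsort hlr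
      obtain ⟨hsort_hd, hsort_tl⟩ := List.pairwise_cons.mp hsort
      obtain ⟨l, r⟩ := hd
      have hstep : pvB_sweep ((l, r) :: tl) done
          = (PySem.List.pyRange (if done < l then l else done + 1) (r + 1) 1).map (fun p => p - 1)
            ++ pvB_sweep tl (if done < r then r else done) := rfl
      set start := (if done < l then l else done + 1) with hstart
      set done' := (if done < r then r else done) with hdone'
      have hstart_spec : ∀ y : Int, start ≤ y ↔ l ≤ y ∧ done < y := by
        intro y; rw [hstart]; split_ifs <;> omega
      have hdone'_spec : done' = max done r := by rw [hdone']; split_ifs <;> omega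
      obtain ⟨hpw_tl, hmem_tl⟩ := ih done' hsort_tl (fun p hp => hlr p (List.mem_cons_of_mem _ hp))
      have hmem_seg : ∀ x : Int,
          x ∈ (PySem.List.pyRange start (r + 1) 1).map (fun p => p - 1) ↔ start ≤ x + 1 ∧ x + 1 ≤ r :=
        fun x => mem_newseg start r x
      constructor
      · rw [hstep, List.pairwise_append]
        refine ⟨pairwise_newseg start r, hpw_tl, ?_⟩
        intro x hx y hy
        have h1 := (hmem_seg x).mp hx
        obtain ⟨p, hp, hp1, hp2, hp3⟩ := (hmem_tl y).mp hy
        omega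
      · intro x
        rw [hstep, List.mem_append, hmem_seg, hmem_tl]
        constructor
        · rintro (⟨h1, h2⟩ | ⟨p, hp, h1, h2, h3⟩)
          · obtain ⟨hl, hd⟩ := (hstart_spec (x + 1)).mp h1
            exact ⟨(l, r), List.mem_cons_self, hl, hd, h2⟩
          · exact ⟨p, List.mem_cons_of_mem _ hp, h1, by omega, h3⟩
        · rintro ⟨p, hp, h1, h2, h3⟩
          rcases List.mem_cons.mp hp with rfl | hp'
          · exact Or.inl ⟨(hstart_spec (x + 1)).mpr ⟨h1, h2⟩, h3⟩
          · by_cases hx' : done' < x + 1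
            · exact Or.inr ⟨p, hp', h1, hx', h3⟩
            · refine Or.inl ⟨(hstart_spec (x + 1)).mpr ⟨le_trans (hsort_hd p hp') h1, h2⟩, by omega⟩

-- strictly increasing from weakly increasing + no duplicates
lemma pairwise_lt_of_le_nodup (l : List Int) (h1 : l.Pairwise (· ≤ ·)) (h2 : l.Nodup) :
    l.Pairwise (· < ·) :=
  (h1.and h2).imp (fun h => lt_of_le_of_ne h.1 h.2)

-- the two main-branch computations agree for any character string body
lemma main_branch (tp : Int) (body : List Char) :
    PySem.List.sorted
        (((PySem.Chars.splitOn body [',']).filter (fun t => decide (t ≠ []))).foldl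
          (fun (res : PySem.Set Int) tok =>
            match pv_clampTok tp tok with
            | some lr => pv_addRange res lr
            | none => res)
          PySem.Set.empty)
        (fun x => x) false
    = pvB_sweep
        (PySem.List.sorted
          ((PySem.Chars.splitOn body [',']).foldl
            (fun acc tok =>
              match (if tok = [] then none else pvB_interval tp tok) with
              | some iv => acc ++ [iv]
              | none => acc) [])
          (fun p => p.1) false) 0 := by
  set toks := PySem.Chars.splitOn body [',']
  have hA : (toks.filter (fun t => decide (t ≠ []))).foldl
      (fun (res : PySem.Set Int) tok =>
        match pv_clampTok tp tok with
        | some lr => pv_addRange res lr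
        | none => res)
      PySem.Set.empty
      = ((toks.filter (fun t => decide (t ≠ []))).filterMap (pv_clampTok tp)).foldl pv_addRange
          PySem.Set.empty := by
    rw [List.foldl_filterMap]
    refine PySem.List.foldl_congr_mem _ _ _ PySem.Set.empty ?_
    intro acc x _
    cases pv_clampTok tp x <;> rfl
  have hB : ∀ (ts : List (List Char)) (acc : List (Int × Int)),
      ts.foldl
        (fun acc tok =>
          match (if tok = [] then none else pvB_interval tp tok) with
          | some iv => acc ++ [iv]
          | none => acc) acc
      = acc ++ (ts.filter (fun t => decide (t ≠ []))).filterMap (pv_clampTok tp) := by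
    intro ts
    induction ts with
    | nil => intro acc; simp
    | cons a ts ih =>
        intro acc
        rw [List.foldl_cons]
        by_cases he : a = []
        · rw [if_pos he, ih]
          subst he
          simp
        · rw [if_neg he, ← clampTok_eq_interval tp a]
          cases hca : pv_clampTok tp a with
          | none => rw [ih]; simp [he, hca]
          | some iv => rw [ih]; simp [he, hca]
  rw [hA, hB, List.nil_append]
  set ivs := (toks.filter (fun t => decide (t ≠ []))).filterMap (pv_clampTok tp) with hivs
  have hbounds : ∀ p ∈ ivs, 1 ≤ p.1 ∧ p.1 ≤ p.2 := by
    intro p hp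
    obtain ⟨tok, _, h⟩ := List.mem_filterMap.mp hp
    exact pv_clampTok_bounds tp tok p h
  set sivs := PySem.List.sorted ivs (fun p => p.1) false with hsivs
  have hperm : sivs.Perm ivs := PySem.List.sorted_perm ivs (fun p => p.1) false
  have hAnodup : (ivs.foldl pv_addRange PySem.Set.empty).Nodup :=
    nodup_setFold ivs PySem.Set.empty List.nodup_nil
  have hApw : (PySem.List.sorted (ivs.foldl pv_addRange PySem.Set.empty) (fun x => x) false).Pairwise
      (· < ·) := by
    refine pairwise_lt_of_le_nodup _ ?_ ?_
    · exact PySem.List.sorted_pairwise _ (fun x => x)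
    · exact ((PySem.List.sorted_perm _ (fun x => x) false).nodup_iff).mpr hAnodup
  have hAmem : ∀ x, x ∈ PySem.List.sorted (ivs.foldl pv_addRange PySem.Set.empty) (fun x => x) false
      ↔ ∃ p ∈ ivs, p.1 ≤ x + 1 ∧ x + 1 ≤ p.2 := by
    intro x
    rw [PySem.List.mem_sorted, mem_setFold]
    simp
  obtain ⟨hBpw, hBmem⟩ :=
    sweep_spec sivs 0
      (PySem.List.sorted_pairwise ivs (fun p => p.1))
      (fun p hp => hbounds p (hperm.mem_iff.mp hp))
  have hBmem' : ∀ x, x ∈ pvB_sweep sivs 0 ↔ ∃ p ∈ ivs, p.1 ≤ x + 1 ∧ x + 1 ≤ p.2 := by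
    intro x
    rw [hBmem x]
    constructor
    · rintro ⟨p, hp, h1, _, h3⟩; exact ⟨p, hperm.mem_iff.mp hp, h1, h3⟩
    · rintro ⟨p, hp, h1, h3⟩
      have := (hbounds p hp).1
      exact ⟨p, hperm.mem_iff.mpr hp, h1, by omega, h3⟩
  refine List.Perm.eq_of_pairwise (le := (· < ·)) ?_ hApw hBpw ?_
  · intro a b _ _ h1 h2; exact ((lt_asymm h1) h2).elim
  · refine (List.perm_ext_iff_of_nodup ?_ ?_).mpr ?_
    · exact hApw.imp (fun h => ne_of_lt h)
    · exact hBpw.imp (fun h => ne_of_lt h)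
    · intro a; rw [hAmem a, hBmem' a]

-- ===== VERDICT (by name: the statement is the Claim_ definition above) =====
theorem parse_pages_spec_spec : Claim_equal_parse_pages_spec := by
  intro spec tp _
  unfold Spec_parse_pages_spec parse_pages_spec parse_pages_spec_alt
  match spec with
  | none => rfl
  | some s =>
    by_cases h : s.toList = [] ∨ PySem.Chars.strip s.toList = []
    · simp only [if_pos h]
    · simp only [if_neg h]
      exact main_branch tp (PySem.Chars.replace s.toList [' '] [])
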